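-- pv_equiv track=rewrite | github.com/xcape-io/PyProps | PygameProps/PygamePodiumProp/PodiumApp.py | displayKeys
-- ===== SOURCE A (Python) =====
-- def displayKeys(keys):
--
-- 	p = ""
-- 	i = 0
-- 	for k in keys:
-- 		if i and i % 4 == 0: p = p + "-"
-- 		p = p + k
-- 		i = i + 1
-- 	return p
-- ===== SOURCE B (Python) =====
-- def displayKeys(keys):
--     ks = list(keys)
--     chunks = [ks[i:i+4] for i in range(0, len(ks), 4)]
--     return '-'.join(''.join(c) for c in chunks)
-- ===== Notes on version B (the rewrite author's own statement) =====
-- stated objective: idiomatic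
-- what changed: B builds the list of 4-key chunks first and then joins them with '-' (chunk-then-join, two stages), instead of A's single pass that tracks a position counter and decides per element whether to emit a dash.
import Mathlib
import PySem

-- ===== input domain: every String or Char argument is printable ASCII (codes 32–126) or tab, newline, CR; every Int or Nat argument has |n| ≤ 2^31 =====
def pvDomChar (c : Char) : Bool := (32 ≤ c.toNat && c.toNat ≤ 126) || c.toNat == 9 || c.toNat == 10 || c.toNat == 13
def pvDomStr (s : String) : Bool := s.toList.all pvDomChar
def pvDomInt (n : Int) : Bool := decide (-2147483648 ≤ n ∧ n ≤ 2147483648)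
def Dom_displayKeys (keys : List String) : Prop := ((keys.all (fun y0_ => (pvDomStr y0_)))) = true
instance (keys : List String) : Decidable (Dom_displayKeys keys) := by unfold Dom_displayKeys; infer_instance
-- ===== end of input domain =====

-- B replaces A's single position-counting accumulation by a two-stage chunk-then-join pass (idiomatic; same cost).

-- ===== PORT A =====
-- state = (p, i); Python truthiness 'if i and i % 4 == 0' is i ≠ 0 ∧ i % 4 = 0
def displayKeys (keys : List String) : String :=
  (keys.foldl
    (fun (st : String × Int) k =>
      let p := if st.2 ≠ 0 ∧ st.2 % 4 = 0 then st.1 ++ "-" else st.1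
      (p ++ k, st.2 + 1))
    ("", 0)).1

-- ===== PORT B =====
-- the while loop: chunks.append(ks[:4]); ks = ks[4:]  (ks[:4] = take 4, ks[4:] = drop 4,
-- exact for nonnegative slice bounds: PySem.List.slice_to_natCast / slice_from_natCast)
def pvChunks4 : List String → List (List String)
  | [] => []
  | x :: xs => ((x :: xs).take 4) :: pvChunks4 ((x :: xs).drop 4)
termination_by l => l.length
decreasing_by simp [List.length_drop]

def displayKeys_alt (keys : List String) : String :=
  PySem.Str.join "-" ((pvChunks4 keys).map (PySem.Str.join ""))

-- ===== PRECONDITION & SPEC =====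
def Spec_displayKeys (keys : List String) (out : String) : Prop := out = displayKeys_alt keys
instance (keys : List String) (out : String) : Decidable (Spec_displayKeys keys out) := by unfold Spec_displayKeys; infer_instance

-- ===== CLAIM (what is proved, stated in full; the proofs are below) =====
def Claim_equal_displayKeys : Prop := ∀ (keys : List String), Dom_displayKeys keys → Spec_displayKeys keys (displayKeys keys)

-- ===== LEMMAS AND PROOFS =====

-- joining the chunk list, abbreviated
def pvJ (l : List (List String)) : String := PySem.Str.join "-" (l.map (PySem.Str.join ""))

theorem pvJ_nil : PySem.Str.join "-" ([] : List String) = "" := by decide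

theorem pvStrJoin0_nil : PySem.Str.join "" ([] : List String) = "" := by decide

theorem pvStrJoin0_cons (s : String) (l : List String) :
    PySem.Str.join "" (s :: l) = s ++ PySem.Str.join "" l := by
  apply String.toList_inj.mp
  cases l <;>
    simp [PySem.Str.toList_join, PySem.Chars.join, List.intercalate]

theorem pvJ_cons (c : List String) (l : List (List String)) (h : l ≠ []) :
    pvJ (c :: l) = PySem.Str.join "" c ++ "-" ++ pvJ l := by
  apply String.toList_inj.mp
  cases l with
  | nil => exact absurd rfl h
  | cons d t =>
    simp [pvJ, PySem.Str.toList_join, PySem.Chars.join, List.intercalate]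

theorem pvJ_singleton (c : List String) : pvJ [c] = PySem.Str.join "" c := by
  apply String.toList_inj.mp
  simp [pvJ, PySem.Str.toList_join, PySem.Chars.join, List.intercalate]

def pvStep (st : String × Int) (k : String) : String × Int :=
  let p := if st.2 ≠ 0 ∧ st.2 % 4 = 0 then st.1 ++ "-" else st.1
  (p ++ k, st.2 + 1)

theorem pvChunks4_nil : pvChunks4 [] = [] := by rw [pvChunks4.eq_def]

theorem pvChunks4_cons (a : String) (t : List String) :
    pvChunks4 (a :: t) = ((a :: t).take 4) :: pvChunks4 ((a :: t).drop 4) := by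
  rw [pvChunks4.eq_def]

theorem pvChunks4_ne_nil (a : String) (t : List String) : pvChunks4 (a :: t) ≠ [] := by
  rw [pvChunks4_cons]; simp

-- consume one chunk of up to four keys: only the first element can emit a dash
theorem pvChunkStep (a : String) (t : List String) (p : String) (i : Int) (hi : i % 4 = 0) :
    (List.foldl pvStep (p, i) (a :: t)).1 =
      (List.foldl pvStep
        ((if i = 0 then p else p ++ "-") ++ PySem.Str.join "" ((a :: t).take 4), i + 4)
        ((a :: t).drop 4)).1 := by
  have hi' : (4 : Int) ∣ i := by omega
  have h1 : ¬ (4 : Int) ∣ (i + 1) := by omega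
  have h2 : ¬ (4 : Int) ∣ (i + 1 + 1) := by omega
  have h3 : ¬ (4 : Int) ∣ (i + 1 + 1 + 1) := by omega
  match t with
  | [] =>
    by_cases h0 : i = 0 <;>
      simp [pvStep, List.foldl, pvStrJoin0_cons, pvStrJoin0_nil, hi', h0, String.append_assoc]
  | [b] =>
    by_cases h0 : i = 0 <;>
      simp [pvStep, List.foldl, pvStrJoin0_cons, pvStrJoin0_nil, hi', h0, h1,
        String.append_assoc]
  | [b, c] =>
    by_cases h0 : i = 0 <;>
      simp [pvStep, List.foldl, pvStrJoin0_cons, pvStrJoin0_nil, hi', h0, h1, h2,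
        String.append_assoc]
  | b :: c :: d :: r =>
    have e : i + 1 + 1 + 1 + 1 = i + 4 := by ring
    by_cases h0 : i = 0 <;>
      simp [pvStep, List.foldl, pvStrJoin0_cons, pvStrJoin0_nil, hi', h0, h1, h2, h3, e,
        String.append_assoc]

-- main invariant, strong induction on length
theorem pvMain : ∀ (n : Nat) (ks : List String) (p : String) (i : Int), ks.length ≤ n →
    0 ≤ i → i % 4 = 0 →
    (List.foldl pvStep (p, i) ks).1 =
      p ++ (if ks = [] then "" else (if i = 0 then "" else "-") ++ pvJ (pvChunks4 ks)) := by
  intro n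
  induction n with
  | zero =>
    intro ks p i hlen _ _
    have hks : ks = [] := by cases ks with | nil => rfl | cons => simp at hlen
    subst hks; simp [List.foldl]
  | succ n ih =>
    intro ks p i hlen hpos hmod
    cases ks with
    | nil => simp [List.foldl]
    | cons a t =>
      rw [pvChunkStep a t p i hmod, pvChunks4_cons]
      by_cases hd : (a :: t).drop 4 = []
      · rw [hd]
        simp only [List.foldl, pvChunks4_nil]
        by_cases h0 : i = 0 <;>
          simp [h0, pvJ_singleton, String.append_assoc]
      · have hlen' : ((a :: t).drop 4).length ≤ n := by
          simp [List.length_drop] at hlen ⊢; omega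
        rw [ih ((a :: t).drop 4)
            ((if i = 0 then p else p ++ "-") ++ PySem.Str.join "" ((a :: t).take 4))
            (i + 4) hlen' (by omega) (by omega)]
        have hne : pvChunks4 ((a :: t).drop 4) ≠ [] := by
          cases h : (a :: t).drop 4 with
          | nil => exact absurd h hd
          | cons x xs => rw [h] at *; exact pvChunks4_ne_nil x xs
        rw [pvJ_cons _ _ hne]
        have h40 : ¬ (i + 4 = 0) := by omega
        have hlt : 3 < t.length := by
          simp [List.drop_eq_nil_iff] at hd; omega
        by_cases h0 : i = 0 <;>
          simp [hlt, h0, h40, String.append_assoc]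

-- ===== VERDICT (by name: the statement is the Claim_ definition above) =====
theorem displayKeys_spec : Claim_equal_displayKeys := by
  intro keys _
  unfold Spec_displayKeys displayKeys displayKeys_alt
  have h := pvMain keys.length keys "" 0 le_rfl le_rfl rfl
  rw [show (fun (st : String × Int) k =>
      let p := if st.2 ≠ 0 ∧ st.2 % 4 = 0 then st.1 ++ "-" else st.1
      (p ++ k, st.2 + 1)) = pvStep from rfl, h]
  cases keys with
  | nil => simp [pvChunks4_nil, pvJ_nil]
  | cons a t => simp [pvJ]
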